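-- pv_equiv track=rewrite | github.com/gotaker/iMRV-Solomon-Islands | mrvtools/mrvtools/pdf_export.py | _column_widths_pct
-- ===== SOURCE A (Python) =====
-- from typing import Any, Dict, Iterable, List, Optional, Sequence
--
-- def _column_widths_pct(n_columns: int, hints: Optional[Sequence[int]] = None) -> List[int]:
-- 	"""Spread n columns evenly across 100% unless hints are provided."""
-- 	if hints and len(hints) == n_columns:
-- 		return list(hints)
-- 	if n_columns <= 0:
-- 		return []
-- 	even = int(100 / n_columns)
-- 	widths = [even] * n_columns
-- 	# Distribute leftover percentage points to the first columns
-- 	leftover = 100 - sum(widths)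
-- 	for i in range(leftover):
-- 		widths[i] += 1
-- 	return widths
-- ===== SOURCE B (Python) =====
-- from typing import List, Optional, Sequence
--
-- def _column_widths_pct(n_columns: int, hints: Optional[Sequence[int]] = None) -> List[int]:
-- 	"""Spread n columns evenly across 100% unless hints are provided."""
-- 	if hints and len(hints) == n_columns:
-- 		return list(hints)
-- 	widths = []
-- 	remaining = 100
-- 	for k in range(n_columns, 0, -1):
-- 		w = -(-remaining // k)  # ceil: fair share of what is left
-- 		widths.append(w)
-- 		remaining -= w
-- 	return widths
-- ===== Notes on version B (the rewrite author's own statement) =====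
-- stated objective: alternative
-- what changed: Replaced the precomputed fill-then-increment distribution with a greedy sequential allocator that walks the columns once, giving each the ceiling of remaining/columns_left and shrinking the budget; the n_columns<=0 guard disappears (empty range).
import Mathlib
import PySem

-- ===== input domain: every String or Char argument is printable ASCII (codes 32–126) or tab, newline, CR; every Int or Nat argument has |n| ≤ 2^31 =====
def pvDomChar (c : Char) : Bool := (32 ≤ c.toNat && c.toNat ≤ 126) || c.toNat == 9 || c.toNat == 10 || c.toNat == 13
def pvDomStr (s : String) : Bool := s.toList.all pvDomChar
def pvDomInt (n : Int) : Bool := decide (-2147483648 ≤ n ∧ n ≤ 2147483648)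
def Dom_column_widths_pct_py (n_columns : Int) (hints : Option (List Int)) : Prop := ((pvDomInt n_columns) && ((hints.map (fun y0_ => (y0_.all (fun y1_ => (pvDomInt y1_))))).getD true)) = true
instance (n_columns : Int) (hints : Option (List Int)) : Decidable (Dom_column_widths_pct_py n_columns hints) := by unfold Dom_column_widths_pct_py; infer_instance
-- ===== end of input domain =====

-- B replaces A's fill-then-increment distribution with a greedy one-pass allocator (ceil of the remaining budget per column); alternative decomposition, same cost.


-- ===== PORT A =====
-- loop body of A after the hints guard (shared fall-through in the Python)
def pvBodyA (n : Int) : List Int :=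
  if n ≤ 0 then []
  else
    let even := PySem.Int.floordiv 100 n  -- int(100 / n): for 0 < n this float truncation equals floor exactly
    let widths := List.replicate n.toNat even
    let leftover := 100 - widths.sum
    (List.range leftover.toNat).foldl (fun w i => w.set i (w.getD i 0 + 1)) widths

def column_widths_pct_py (n_columns : Int) (hints : Option (List Int)) : List Int :=
  match hints with
  | some h => if h ≠ [] ∧ (h.length : Int) = n_columns then h else pvBodyA n_columns
  | none => pvBodyA n_columns

-- ===== PORT B =====
-- greedy loop of B: for k in range(n, 0, -1): give the next column ceil(remaining/k)
def pvStep (st : List Int × Int) (k : Int) : List Int × Int :=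
  let w := -(PySem.Int.floordiv (-st.2) k)  -- -(-remaining // k) = ceil
  (st.1 ++ [w], st.2 - w)

def pvBodyB (n : Int) : List Int :=
  ((PySem.List.pyRange n 0 (-1)).foldl pvStep ([], 100)).1

def column_widths_pct_py_alt (n_columns : Int) (hints : Option (List Int)) : List Int :=
  match hints with
  | some h => if h ≠ [] ∧ (h.length : Int) = n_columns then h else pvBodyB n_columns
  | none => pvBodyB n_columns

-- ===== PRECONDITION & SPEC =====
def Spec_column_widths_pct_py (n_columns : Int) (hints : Option (List Int)) (out : List Int) : Prop := out = column_widths_pct_py_alt n_columns hints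
instance (n_columns : Int) (hints : Option (List Int)) (out : List Int) : Decidable (Spec_column_widths_pct_py n_columns hints out) := by unfold Spec_column_widths_pct_py; infer_instance

-- ===== CLAIM (what is proved, stated in full; the proofs are below) =====
def Claim_equal_column_widths_pct_py : Prop := ∀ (n_columns : Int) (hints : Option (List Int)), Dom_column_widths_pct_py n_columns hints → Spec_column_widths_pct_py n_columns hints (column_widths_pct_py n_columns hints)

-- ===== LEMMAS AND PROOFS =====
-- Incrementing indices 0..k-1 of a constant list turns its first k entries into e+1.
theorem pv_incr_loop (e : Int) : ∀ (k m : Nat), k ≤ m →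
    (List.range k).foldl (fun w i => w.set i (w.getD i 0 + 1)) (List.replicate m e)
    = List.replicate k (e + 1) ++ List.replicate (m - k) e := by
  intro k
  induction k with
  | zero => intro m _; simp
  | succ k ih =>
    intro m hk
    rw [List.range_succ, List.foldl_append, ih m (by omega)]
    have hm : m - k = (m - (k + 1)) + 1 := by omega
    rw [hm, List.replicate_succ]
    simp only [List.foldl_cons, List.foldl_nil]
    simp [List.set_append_right, List.replicate_succ' (n := k)]

-- A's loop result, characterised: first r columns get q+1, the rest q (q = 100/n, r = 100%n).
theorem pv_bodyA_char (n : Int) (hn : 0 < n) :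
    pvBodyA n = List.replicate ((100 : Int) % n).toNat ((100 : Int) / n + 1)
      ++ List.replicate ((n - 100 % n)).toNat ((100 : Int) / n) := by
  have hfd : PySem.Int.floordiv 100 n = 100 / n := PySem.Int.floordiv_eq_ediv_of_pos hn
  have hcast : (n.toNat : Int) = n := Int.toNat_of_nonneg (by omega)
  have hdm : n * ((100 : Int) / n) + 100 % n = 100 := Int.mul_ediv_add_emod 100 n
  have hr0 : 0 ≤ (100 : Int) % n := Int.emod_nonneg _ (by omega)
  have hr1 : (100 : Int) % n < n := Int.emod_lt_of_pos _ hn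
  have hsum : (List.replicate n.toNat ((100 : Int) / n)).sum = n * (100 / n) := by
    simp [List.sum_replicate, hcast]
  simp only [pvBodyA, if_neg (show ¬ n ≤ 0 by omega), hfd]
  rw [show (100 : Int) - (List.replicate n.toNat ((100 : Int) / n)).sum = 100 % n from by
        rw [hsum]; linarith]
  rw [pv_incr_loop _ _ _ (by omega)]
  congr 2
  omega

-- B's greedy loop, characterised: over countdown k..1 with budget t (0 ≤ t; t = 0 when k = 0),
-- the ceil-of-remaining allocation yields first t%k columns t/k+1, the rest t/k.
theorem pv_greedy (k : Nat) : ∀ (t : Int) (acc : List Int), 0 ≤ t → (k = 0 → t = 0) →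
    ((PySem.List.pyRange (k : Int) 0 (-1)).foldl pvStep (acc, t)).1
    = acc ++ List.replicate (t % (k : Int)).toNat (t / (k : Int) + 1)
        ++ List.replicate (((k : Int) - t % (k : Int))).toNat (t / (k : Int)) := by
  induction k with
  | zero =>
    intro t acc _ h0
    have ht : t = 0 := h0 rfl
    rw [PySem.List.pyRange_neg_one_eq_nil (by norm_num)]
    simp [ht]
  | succ k ih =>
    intro t acc ht _
    rw [show ((k + 1 : Nat) : Int) = (k : Int) + 1 by push_cast; ring,
        PySem.List.pyRange_neg_one_cons (by positivity), List.foldl_cons,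
        show ((k : Int) + 1 - 1) = (k : Int) from by ring]
    set K : Int := (k : Int) + 1 with hKdef
    have hK : (0 : Int) < K := by positivity
    set q : Int := t / K with hq
    set r : Int := t % K with hr
    have hdm : K * q + r = t := by rw [hq, hr]; exact Int.mul_ediv_add_emod t K
    have hr0 : 0 ≤ r := Int.emod_nonneg _ (by omega)
    have hr1 : r < K := Int.emod_lt_of_pos _ hK
    have hq0 : 0 ≤ q := Int.ediv_nonneg ht (by omega)
    have hw : -(PySem.Int.floordiv (-t) K) = (if r = 0 then q else q + 1) := by
      rw [PySem.Int.neg_floordiv_neg_eq_iff_of_pos hK]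
      by_cases h0 : r = 0
      · rw [if_pos h0]; constructor <;> nlinarith
      · rw [if_neg h0]
        have hrpos : 0 < r := by omega
        constructor <;> nlinarith
    have hstep : pvStep (acc, t) K = (acc ++ [if r = 0 then q else q + 1],
        t - (if r = 0 then q else q + 1)) := by
      simp only [pvStep]
      rw [hw]
    rw [hstep]
    by_cases h0 : r = 0
    · -- exact division: give q, recurse on budget k*q
      rw [if_pos h0]
      have hq' : t - q = (k : Int) * q := by nlinarith
      rcases Nat.eq_zero_or_pos k with hk | hk
      · subst hk
        rw [PySem.List.pyRange_neg_one_eq_nil (by norm_num)]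
        simp only [List.foldl_nil]
        simp [h0, hKdef]
      · have hkne : ((k : Int)) ≠ 0 := by
          have : (0 : Int) < (k : Int) := by exact_mod_cast hk
          omega
        have hmod : (t - q) % (k : Int) = 0 := by
          rw [hq']; exact Int.mul_emod_right _ _
        have hdiv : (t - q) / (k : Int) = q := by
          rw [hq', Int.mul_ediv_cancel_left _ hkne]
        rw [ih (t - q) (acc ++ [q]) (by nlinarith) (fun hk0 => absurd hk0 (by omega)),
            hmod, hdiv, h0]
        rw [show (K - 0).toNat = ((k : Int) - 0).toNat + 1 from by omega, List.replicate_succ]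
        simp [List.append_assoc]
    · -- remainder left: give q+1, recurse on budget (r-1) + k*q
      rw [if_neg h0]
      have hkpos : 0 < k := by
        rcases Nat.eq_zero_or_pos k with hk | hk
        · exfalso; subst hk; simp only [hKdef] at hr1; omega
        · exact hk
      have hkInt : (0 : Int) < (k : Int) := by exact_mod_cast hkpos
      have ht' : t - (q + 1) = (r - 1) + (k : Int) * q := by nlinarith
      have hrpos : 0 < r := by omega
      have ht0 : 0 ≤ t - (q + 1) := by nlinarith [mul_nonneg (le_of_lt hkInt) hq0]
      have hmod : (t - (q + 1)) % (k : Int) = r - 1 := by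
        rw [ht', Int.add_mul_emod_self_left, Int.emod_eq_of_lt (by omega) (by omega)]
      have hdiv : (t - (q + 1)) / (k : Int) = q := by
        rw [ht', Int.add_mul_ediv_left _ _ (by omega),
            Int.ediv_eq_zero_of_lt (by omega) (by omega)]
        ring
      rw [ih (t - (q + 1)) (acc ++ [q + 1]) ht0 (fun hk0 => absurd hk0 (by omega)),
          hmod, hdiv]
      rw [show ((k : Int) - (r - 1)) = K - r from by omega]
      rw [show r.toNat = (r - 1).toNat + 1 from by omega, List.replicate_succ]
      simp [List.append_assoc]

theorem pv_body_eq (n : Int) : pvBodyA n = pvBodyB n := by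
  unfold pvBodyB
  by_cases hn : n ≤ 0
  · rw [PySem.List.pyRange_neg_one_eq_nil (by omega)]
    unfold pvBodyA
    simp [hn]
  · have hpos : 0 < n := by omega
    have hcast : ((n.toNat : Nat) : Int) = n := Int.toNat_of_nonneg (by omega)
    have hgr := pv_greedy n.toNat 100 [] (by norm_num) (by omega)
    rw [hcast] at hgr
    rw [hgr, List.nil_append, pv_bodyA_char n hpos]

-- ===== VERDICT (by name: the statement is the Claim_ definition above) =====
theorem column_widths_pct_py_spec : Claim_equal_column_widths_pct_py := by
  intro n hints _
  unfold Spec_column_widths_pct_py column_widths_pct_py column_widths_pct_py_alt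
  cases hints with
  | none => exact pv_body_eq n
  | some h =>
    by_cases hc : h ≠ [] ∧ (h.length : Int) = n
    · simp [hc]
    · simp [hc, pv_body_eq n]
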